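-- pv_equiv track=rewrite | github.com/dalideco/gpn-tron-example-player | algorithms/quadrant_avoid.py | _count_quadrant_empty
-- ===== SOURCE A (Python) =====
-- def _count_quadrant_empty(occupied, map_size):
--     """Count empty squares in each quadrant."""
--     mid_x = map_size[0] // 2
--     mid_y = map_size[1] // 2
--
--     counts = {0: 0, 1: 0, 2: 0, 3: 0}
--
--     for x in range(map_size[0]):
--         for y in range(map_size[1]):
--             if (x, y) not in occupied:
--                 if x < mid_x:
--                     quadrant = 0 if y < mid_y else 2
--                 else:
--                     quadrant = 1 if y < mid_y else 3
--                 counts[quadrant] += 1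
--
--     return counts
-- ===== SOURCE B (Python) =====
-- def _count_quadrant_empty(occupied, map_size):
--     """Count empty squares in each quadrant: quadrant areas minus distinct in-bounds occupied cells."""
--     w, h = map_size
--     mid_x = w // 2
--     mid_y = h // 2
--     if w <= 0 or h <= 0:
--         return {0: 0, 1: 0, 2: 0, 3: 0}
--     c0 = mid_x * mid_y
--     c1 = (w - mid_x) * mid_y
--     c2 = mid_x * (h - mid_y)
--     c3 = (w - mid_x) * (h - mid_y)
--     for (x, y) in set(occupied):
--         if 0 <= x < w and 0 <= y < h:
--             if x < mid_x:
--                 if y < mid_y: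
--                     c0 -= 1
--                 else:
--                     c2 -= 1
--             else:
--                 if y < mid_y:
--                     c1 -= 1
--                 else:
--                     c3 -= 1
--     return {0: c0, 1: c1, 2: c2, 3: c3}
-- ===== Notes on version B (the rewrite author's own statement) =====
-- stated objective: faster
-- what changed: Replaces the W*H grid scan with a list-membership test per cell by computing each quadrant's area analytically and subtracting the distinct in-bounds occupied cells per quadrant, one pass over set(occupied).
import Mathlib
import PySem

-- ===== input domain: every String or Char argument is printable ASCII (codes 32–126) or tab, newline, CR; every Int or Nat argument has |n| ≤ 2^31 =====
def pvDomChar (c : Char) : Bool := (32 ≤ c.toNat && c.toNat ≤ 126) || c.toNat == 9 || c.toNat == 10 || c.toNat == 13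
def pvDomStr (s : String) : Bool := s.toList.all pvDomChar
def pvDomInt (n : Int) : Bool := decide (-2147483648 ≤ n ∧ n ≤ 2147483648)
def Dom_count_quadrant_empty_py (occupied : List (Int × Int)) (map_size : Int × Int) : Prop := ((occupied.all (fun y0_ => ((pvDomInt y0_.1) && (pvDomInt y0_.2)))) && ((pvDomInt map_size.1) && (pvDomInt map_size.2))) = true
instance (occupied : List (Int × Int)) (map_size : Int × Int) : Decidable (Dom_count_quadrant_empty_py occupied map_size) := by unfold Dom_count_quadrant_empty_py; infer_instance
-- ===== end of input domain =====

-- B replaces A's W*H grid scan (membership test per cell) by quadrant areas minus the distinct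
-- in-bounds occupied cells per quadrant, one pass over set(occupied) — asymptotically faster.

-- ===== PORT A =====
def count_quadrant_empty_py (occupied : List (Int × Int)) (map_size : Int × Int) : List (Int × Int) :=
  let mid_x := PySem.Int.floordiv map_size.1 2
  let mid_y := PySem.Int.floordiv map_size.2 2
  let counts : PySem.Dict Int Int :=
    ((((PySem.Dict.empty).insert 0 0).insert 1 0).insert 2 0).insert 3 0
  let counts := (PySem.List.pyRange 0 map_size.1 1).foldl (fun counts x =>
    (PySem.List.pyRange 0 map_size.2 1).foldl (fun counts y =>
      if (x, y) ∉ occupied then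
        let quadrant : Int :=
          if x < mid_x then (if y < mid_y then 0 else 2)
          else (if y < mid_y then 1 else 3)
        counts.modify quadrant 0 (· + 1)
      else counts) counts) counts
  counts.items

-- ===== PORT B =====
def count_quadrant_empty_py_alt (occupied : List (Int × Int)) (map_size : Int × Int) : List (Int × Int) :=
  let w := map_size.1
  let h := map_size.2
  let mid_x := PySem.Int.floordiv w 2
  let mid_y := PySem.Int.floordiv h 2
  if w ≤ 0 ∨ h ≤ 0 then [(0, 0), (1, 0), (2, 0), (3, 0)]
  else
    let c := (PySem.Set.ofList occupied).foldl (fun (c : Int × Int × Int × Int) p =>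
      if 0 ≤ p.1 ∧ p.1 < w ∧ 0 ≤ p.2 ∧ p.2 < h then
        if p.1 < mid_x then
          (if p.2 < mid_y then (c.1 - 1, c.2.1, c.2.2.1, c.2.2.2)
           else (c.1, c.2.1, c.2.2.1 - 1, c.2.2.2))
        else
          (if p.2 < mid_y then (c.1, c.2.1 - 1, c.2.2.1, c.2.2.2)
           else (c.1, c.2.1, c.2.2.1, c.2.2.2 - 1))
      else c)
      (mid_x * mid_y, (w - mid_x) * mid_y, mid_x * (h - mid_y), (w - mid_x) * (h - mid_y))
    [(0, c.1), (1, c.2.1), (2, c.2.2.1), (3, c.2.2.2)]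

-- ===== PRECONDITION & SPEC =====
def Spec_count_quadrant_empty_py (occupied : List (Int × Int)) (map_size : Int × Int) (out : List (Int × Int)) : Prop := out = count_quadrant_empty_py_alt occupied map_size
instance (occupied : List (Int × Int)) (map_size : Int × Int) (out : List (Int × Int)) : Decidable (Spec_count_quadrant_empty_py occupied map_size out) := by unfold Spec_count_quadrant_empty_py; infer_instance

-- ===== CLAIM (what is proved, stated in full; the proofs are below) =====
def Claim_equal_count_quadrant_empty_py : Prop := ∀ (occupied : List (Int × Int)) (map_size : Int × Int), Dom_count_quadrant_empty_py occupied map_size → Spec_count_quadrant_empty_py occupied map_size (count_quadrant_empty_py occupied map_size)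

-- ===== LEMMAS AND PROOFS =====

-- quadrant classification of a cell, as A computes it
def pvCls (mx my : Int) (c : Int × Int) : Int :=
  if c.1 < mx then (if c.2 < my then 0 else 2) else (if c.2 < my then 1 else 3)

-- the grid scanned by A
def pvGrid (w h : Int) : List (Int × Int) :=
  (PySem.List.pyRange 0 w 1).flatMap (fun x => (PySem.List.pyRange 0 h 1).map (fun y => (x, y)))

-- A's per-quadrant count: empty grid cells of class q
def pvN (occupied : List (Int × Int)) (w h q : Int) : Nat :=
  (((pvGrid w h).filter (fun c => decide (c ∉ occupied))).map
      (pvCls (PySem.Int.floordiv w 2) (PySem.Int.floordiv h 2))).count q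

lemma pvGrid_nodup (w h : Int) : (pvGrid w h).Nodup := by
  have : pvGrid w h = (PySem.List.pyRange 0 w 1) ×ˢ (PySem.List.pyRange 0 h 1) := rfl
  rw [this]
  exact List.Nodup.product (PySem.List.nodup_pyRange_one 0 w) (PySem.List.nodup_pyRange_one 0 h)

lemma pvGrid_mem (w h : Int) (c : Int × Int) :
    c ∈ pvGrid w h ↔ 0 ≤ c.1 ∧ c.1 < w ∧ 0 ≤ c.2 ∧ c.2 < h := by
  obtain ⟨x, y⟩ := c
  simp only [pvGrid, List.mem_flatMap, List.mem_map, PySem.List.mem_pyRange_one, Prod.mk.injEq]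
  constructor
  · rintro ⟨a, ha, b, hb, rfl, rfl⟩; exact ⟨ha.1, ha.2, hb.1, hb.2⟩
  · rintro ⟨h1, h2, h3, h4⟩; exact ⟨x, ⟨h1, h2⟩, y, ⟨h3, h4⟩, rfl, rfl⟩

-- characterization of port A: the items list is the four classified counts
lemma pvA_char (occupied : List (Int × Int)) (w h : Int) :
    count_quadrant_empty_py occupied (w, h) =
      [(0, (pvN occupied w h 0 : Int)), (1, (pvN occupied w h 1 : Int)),
       (2, (pvN occupied w h 2 : Int)), (3, (pvN occupied w h 3 : Int))] := by
  have h1 : count_quadrant_empty_py occupied (w, h)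
      = ((pvGrid w h).foldl
          (fun (d : PySem.Dict Int Int) c =>
            if c ∉ occupied then
              d.modify (pvCls (PySem.Int.floordiv w 2) (PySem.Int.floordiv h 2) c) 0 (· + 1)
            else d)
          (((((PySem.Dict.empty : PySem.Dict Int Int).insert 0 0).insert 1 0).insert 2 0).insert 3 0)).items := by
    simp only [count_quadrant_empty_py, pvGrid, pvCls, List.foldl_flatMap, List.foldl_map]
  rw [h1, PySem.List.foldl_ite_eq_foldl_filter (p := fun c => c ∉ occupied)
        (f := fun (d : PySem.Dict Int Int) c =>
          d.modify (pvCls (PySem.Int.floordiv w 2) (PySem.Int.floordiv h 2) c) 0 (· + 1))]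
  rw [← List.foldl_map (f := pvCls (PySem.Int.floordiv w 2) (PySem.Int.floordiv h 2))
        (g := fun (d : PySem.Dict Int Int) k => d.modify k 0 (· + 1))]
  set L := ((pvGrid w h).filter (fun c => decide (c ∉ occupied))).map
      (pvCls (PySem.Int.floordiv w 2) (PySem.Int.floordiv h 2)) with hL
  have hkeys : (L.foldl (fun (d : PySem.Dict Int Int) k => d.modify k 0 (· + 1))
      (((((PySem.Dict.empty : PySem.Dict Int Int).insert 0 0).insert 1 0).insert 2 0).insert 3 0)).keys
      = [0, 1, 2, 3] := by
    rw [PySem.Dict.keys_foldl_modify L 0 (fun _ _ => (· + 1))]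
    rw [PySem.Set.update_eq_append_filter]
    have : List.filter (fun y => !(PySem.Set.contains
        ((((((PySem.Dict.empty : PySem.Dict Int Int).insert 0 0).insert 1 0).insert 2 0).insert 3 0).keys) y))
        (PySem.Set.ofList L) = [] := by
      rw [List.filter_eq_nil_iff]
      intro y hy
      have : y ∈ L := (PySem.Set.mem_ofList L y).mp hy
      obtain ⟨c, -, rfl⟩ := List.mem_map.mp this
      unfold pvCls
      split_ifs <;> decide
    rw [this, List.append_nil]
    rfl
  have hnodup : (L.foldl (fun (d : PySem.Dict Int Int) k => d.modify k 0 (· + 1))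
      (((((PySem.Dict.empty : PySem.Dict Int Int).insert 0 0).insert 1 0).insert 2 0).insert 3 0)).keys.Nodup := by
    rw [hkeys]; decide
  rw [PySem.Dict.items_eq_map_keys _ hnodup 0, hkeys]
  have hgetD : ∀ q : Int,
      (L.foldl (fun (d : PySem.Dict Int Int) k => d.modify k 0 (· + 1))
        (((((PySem.Dict.empty : PySem.Dict Int Int).insert 0 0).insert 1 0).insert 2 0).insert 3 0)).getD q 0
      = (((((PySem.Dict.empty : PySem.Dict Int Int).insert 0 0).insert 1 0).insert 2 0).insert 3 0).getD q 0
        + (L.count q : Int) := fun q => PySem.Dict.getD_foldl_modify_add_one L _ q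
  simp only [List.map_cons, List.map_nil, hgetD, pvN, ← hL]
  norm_num
  all_goals decide

-- B's fold: subtract, per quadrant, the in-bounds members of the list
lemma pvB_fold (w h mx my : Int) :
    ∀ (l : List (Int × Int)) (c0 c1 c2 c3 : Int),
      l.foldl (fun (c : Int × Int × Int × Int) p =>
        if 0 ≤ p.1 ∧ p.1 < w ∧ 0 ≤ p.2 ∧ p.2 < h then
          if p.1 < mx then
            (if p.2 < my then (c.1 - 1, c.2.1, c.2.2.1, c.2.2.2)
             else (c.1, c.2.1, c.2.2.1 - 1, c.2.2.2))
          else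
            (if p.2 < my then (c.1, c.2.1 - 1, c.2.2.1, c.2.2.2)
             else (c.1, c.2.1, c.2.2.1, c.2.2.2 - 1))
        else c) (c0, c1, c2, c3) =
      (c0 - (l.countP (fun c => decide (0 ≤ c.1 ∧ c.1 < w ∧ 0 ≤ c.2 ∧ c.2 < h) && (pvCls mx my c == 0)) : Int),
       c1 - (l.countP (fun c => decide (0 ≤ c.1 ∧ c.1 < w ∧ 0 ≤ c.2 ∧ c.2 < h) && (pvCls mx my c == 1)) : Int),
       c2 - (l.countP (fun c => decide (0 ≤ c.1 ∧ c.1 < w ∧ 0 ≤ c.2 ∧ c.2 < h) && (pvCls mx my c == 2)) : Int),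
       c3 - (l.countP (fun c => decide (0 ≤ c.1 ∧ c.1 < w ∧ 0 ≤ c.2 ∧ c.2 < h) && (pvCls mx my c == 3)) : Int)) := by
  intro l
  induction l with
  | nil => intro c0 c1 c2 c3; simp
  | cons a t ih =>
    intro c0 c1 c2 c3
    by_cases hin : 0 ≤ a.1 ∧ a.1 < w ∧ 0 ≤ a.2 ∧ a.2 < h
    · have hc : ∀ q : Int, (pvCls mx my a == q) = (decide (a.1 < mx) && decide (a.2 < my) && (0 == q)
          || decide (a.1 < mx) && !decide (a.2 < my) && (2 == q)
          || !decide (a.1 < mx) && decide (a.2 < my) && (1 == q)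
          || !decide (a.1 < mx) && !decide (a.2 < my) && (3 == q)) := by
        intro q; unfold pvCls; split_ifs <;> simp [*]
      by_cases hx : a.1 < mx <;> by_cases hy : a.2 < my <;>
        · simp only [List.foldl_cons, ih, List.countP_cons, hc]
          simp [hin, hx, hy, Prod.ext_iff]
          all_goals omega
    · simp only [List.foldl_cons, List.countP_cons, ih, hin, decide_false, Bool.false_and]
      simp

lemma pvCountP_split {α : Type} (l : List α) (p r : α → Bool) :
    l.countP (fun a => p a && !r a) + l.countP (fun a => p a && r a) = l.countP p := by
  induction l with
  | nil => simp
  | cons a t ih =>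
    simp only [List.countP_cons]
    cases hp : p a <;> cases hr : r a <;> simp [hp, hr] <;> try omega

lemma pvCountP_flat (xs ys : List Int) (px py : Int → Bool) :
    ((xs.flatMap fun x => ys.map fun y => (x, y)).countP
        (fun c : Int × Int => px c.1 && py c.2)) = xs.countP px * ys.countP py := by
  induction xs with
  | nil => simp
  | cons x t ih =>
    simp only [List.flatMap_cons, List.countP_append, List.countP_map, List.countP_cons, ih]
    have : (ys.countP ((fun c : Int × Int => px c.1 && py c.2) ∘ fun y => (x, y)))
        = if px x then ys.countP py else 0 := by
      cases hx : px x <;> simp [Function.comp_def, hx]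
    rw [this]
    cases hx : px x <;> simp [hx] <;> ring

lemma pvCnt_lt (w m : Int) (h0 : 0 ≤ m) (h1 : m ≤ w) :
    (PySem.List.pyRange 0 w 1).countP (fun x => decide (x < m)) = m.toNat := by
  rw [PySem.List.pyRange_one_append 0 m w h0 h1, List.countP_append]
  have ha : (PySem.List.pyRange 0 m 1).countP (fun x => decide (x < m))
      = (PySem.List.pyRange 0 m 1).length :=
    List.countP_eq_length.mpr (fun a ha => by
      have := (PySem.List.mem_pyRange_one).mp ha; simp [this.2])
  have hb : (PySem.List.pyRange m w 1).countP (fun x => decide (x < m)) = 0 :=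
    List.countP_eq_zero.mpr (fun a ha => by
      have := (PySem.List.mem_pyRange_one).mp ha; simp; omega)
  rw [ha, hb, PySem.List.length_pyRange_one]
  omega

lemma pvCnt_ge (w m : Int) (h0 : 0 ≤ m) (h1 : m ≤ w) :
    (PySem.List.pyRange 0 w 1).countP (fun x => !decide (x < m)) = (w - m).toNat := by
  rw [PySem.List.pyRange_one_append 0 m w h0 h1, List.countP_append]
  have ha : (PySem.List.pyRange 0 m 1).countP (fun x => !decide (x < m)) = 0 :=
    List.countP_eq_zero.mpr (fun a ha => by
      have := (PySem.List.mem_pyRange_one).mp ha; simp [this.2])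
  have hb : (PySem.List.pyRange m w 1).countP (fun x => !decide (x < m))
      = (PySem.List.pyRange m w 1).length :=
    List.countP_eq_length.mpr (fun a ha => by
      have := (PySem.List.mem_pyRange_one).mp ha; simp; omega)
  rw [ha, hb, PySem.List.length_pyRange_one]
  omega

lemma pvExchange (occupied : List (Int × Int)) (w h : Int) (p : Int × Int → Bool) :
    (pvGrid w h).countP (fun c => p c && decide (c ∈ occupied))
      = (PySem.Set.ofList occupied).countP
          (fun c => decide (0 ≤ c.1 ∧ c.1 < w ∧ 0 ≤ c.2 ∧ c.2 < h) && p c) := by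
  rw [List.countP_eq_length_filter, List.countP_eq_length_filter]
  apply List.Perm.length_eq
  rw [List.perm_ext_iff_of_nodup ((pvGrid_nodup w h).filter _)
        ((PySem.Set.nodup_ofList occupied).filter _)]
  intro a
  simp only [List.mem_filter, Bool.and_eq_true, decide_eq_true_eq, pvGrid_mem,
    PySem.Set.mem_ofList]
  tauto

lemma pvGridCount (w h : Int) (hw : 0 ≤ PySem.Int.floordiv w 2 ∧ PySem.Int.floordiv w 2 ≤ w)
    (hh : 0 ≤ PySem.Int.floordiv h 2 ∧ PySem.Int.floordiv h 2 ≤ h) :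
    ((pvGrid w h).countP (fun c => pvCls (PySem.Int.floordiv w 2) (PySem.Int.floordiv h 2) c == 0)
        = (PySem.Int.floordiv w 2).toNat * (PySem.Int.floordiv h 2).toNat)
    ∧ ((pvGrid w h).countP (fun c => pvCls (PySem.Int.floordiv w 2) (PySem.Int.floordiv h 2) c == 1)
        = (w - PySem.Int.floordiv w 2).toNat * (PySem.Int.floordiv h 2).toNat)
    ∧ ((pvGrid w h).countP (fun c => pvCls (PySem.Int.floordiv w 2) (PySem.Int.floordiv h 2) c == 2)
        = (PySem.Int.floordiv w 2).toNat * (h - PySem.Int.floordiv h 2).toNat)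
    ∧ ((pvGrid w h).countP (fun c => pvCls (PySem.Int.floordiv w 2) (PySem.Int.floordiv h 2) c == 3)
        = (w - PySem.Int.floordiv w 2).toNat * (h - PySem.Int.floordiv h 2).toNat) := by
  set mx := PySem.Int.floordiv w 2
  set my := PySem.Int.floordiv h 2
  have hc : ∀ (q : Int) (px py : Int → Bool),
      (∀ c : Int × Int, (pvCls mx my c == q) = (px c.1 && py c.2)) →
      (pvGrid w h).countP (fun c => pvCls mx my c == q)
        = (PySem.List.pyRange 0 w 1).countP px * (PySem.List.pyRange 0 h 1).countP py := by
    intro q px py hpq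
    rw [List.countP_congr (fun c _ => by rw [hpq c])]
    exact pvCountP_flat _ _ px py
  refine ⟨?_, ?_, ?_, ?_⟩
  · rw [hc 0 (fun x => decide (x < mx)) (fun y => decide (y < my))
      (fun c => by unfold pvCls; split_ifs <;> simp [*]),
      pvCnt_lt w mx hw.1 hw.2, pvCnt_lt h my hh.1 hh.2]
  · rw [hc 1 (fun x => !decide (x < mx)) (fun y => decide (y < my))
      (fun c => by unfold pvCls; split_ifs <;> simp [*]),
      pvCnt_ge w mx hw.1 hw.2, pvCnt_lt h my hh.1 hh.2]
  · rw [hc 2 (fun x => decide (x < mx)) (fun y => !decide (y < my))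
      (fun c => by unfold pvCls; split_ifs <;> simp [*]),
      pvCnt_lt w mx hw.1 hw.2, pvCnt_ge h my hh.1 hh.2]
  · rw [hc 3 (fun x => !decide (x < mx)) (fun y => !decide (y < my))
      (fun c => by unfold pvCls; split_ifs <;> simp [*]),
      pvCnt_ge w mx hw.1 hw.2, pvCnt_ge h my hh.1 hh.2]

-- ===== VERDICT (by name: the statement is the Claim_ definition above) =====
theorem count_quadrant_empty_py_spec : Claim_equal_count_quadrant_empty_py := by
  intro occupied ms _hdom
  obtain ⟨w, h⟩ := ms
  unfold Spec_count_quadrant_empty_py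
  by_cases hwh : w ≤ 0 ∨ h ≤ 0
  · have hg : pvGrid w h = [] := by
      rcases hwh with hw | hh
      · simp [pvGrid, PySem.List.pyRange_one_eq_nil hw]
      · simp [pvGrid, PySem.List.pyRange_one_eq_nil hh]
    rw [pvA_char]
    simp [count_quadrant_empty_py_alt, hwh, pvN, hg]
  · have hmx : 0 ≤ PySem.Int.floordiv w 2 ∧ PySem.Int.floordiv w 2 ≤ w := by
      have : PySem.Int.floordiv w 2 = w / 2 := by simp [PySem.Int.floordiv, Int.fdiv_eq_ediv]
      omega
    have hmy : 0 ≤ PySem.Int.floordiv h 2 ∧ PySem.Int.floordiv h 2 ≤ h := by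
      have : PySem.Int.floordiv h 2 = h / 2 := by simp [PySem.Int.floordiv, Int.fdiv_eq_ediv]
      omega
    have key : ∀ q : Int, (pvN occupied w h q : Int)
        = ((pvGrid w h).countP
            (fun c => pvCls (PySem.Int.floordiv w 2) (PySem.Int.floordiv h 2) c == q) : Int)
          - ((PySem.Set.ofList occupied).countP
              (fun c => decide (0 ≤ c.1 ∧ c.1 < w ∧ 0 ≤ c.2 ∧ c.2 < h)
                && (pvCls (PySem.Int.floordiv w 2) (PySem.Int.floordiv h 2) c == q)) : Int) := by
      intro q
      have hN : pvN occupied w h q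
          = (pvGrid w h).countP
              (fun c => (pvCls (PySem.Int.floordiv w 2) (PySem.Int.floordiv h 2) c == q)
                && !decide (c ∈ occupied)) := by
        rw [pvN, List.count_eq_countP, List.countP_map, List.countP_filter]
        exact List.countP_congr (fun c _ => by simp only [Function.comp_def, decide_not])
      have hsplit := pvCountP_split (pvGrid w h)
        (fun c => pvCls (PySem.Int.floordiv w 2) (PySem.Int.floordiv h 2) c == q)
        (fun c => decide (c ∈ occupied))
      have hex := pvExchange occupied w h
        (fun c => pvCls (PySem.Int.floordiv w 2) (PySem.Int.floordiv h 2) c == q)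
      omega
    obtain ⟨g0, g1, g2, g3⟩ := pvGridCount w h hmx hmy
    have hwh' : ¬ (w ≤ 0 ∨ h ≤ 0) := by omega
    simp only [count_quadrant_empty_py_alt, if_neg hwh']
    rw [pvA_char, pvB_fold]
    have e0 : (((PySem.Int.floordiv w 2).toNat * (PySem.Int.floordiv h 2).toNat : Nat) : Int)
        = PySem.Int.floordiv w 2 * PySem.Int.floordiv h 2 := by
      push_cast [Int.toNat_of_nonneg hmx.1, Int.toNat_of_nonneg hmy.1]; ring
    have e1 : (((w - PySem.Int.floordiv w 2).toNat * (PySem.Int.floordiv h 2).toNat : Nat) : Int)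
        = (w - PySem.Int.floordiv w 2) * PySem.Int.floordiv h 2 := by
      push_cast [Int.toNat_of_nonneg (by omega : (0:Int) ≤ w - PySem.Int.floordiv w 2),
        Int.toNat_of_nonneg hmy.1]; ring
    have e2 : (((PySem.Int.floordiv w 2).toNat * (h - PySem.Int.floordiv h 2).toNat : Nat) : Int)
        = PySem.Int.floordiv w 2 * (h - PySem.Int.floordiv h 2) := by
      push_cast [Int.toNat_of_nonneg hmx.1,
        Int.toNat_of_nonneg (by omega : (0:Int) ≤ h - PySem.Int.floordiv h 2)]; ring
    have e3 : (((w - PySem.Int.floordiv w 2).toNat * (h - PySem.Int.floordiv h 2).toNat : Nat) : Int)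
        = (w - PySem.Int.floordiv w 2) * (h - PySem.Int.floordiv h 2) := by
      push_cast [Int.toNat_of_nonneg (by omega : (0:Int) ≤ w - PySem.Int.floordiv w 2),
        Int.toNat_of_nonneg (by omega : (0:Int) ≤ h - PySem.Int.floordiv h 2)]; ring
    rw [key 0, key 1, key 2, key 3, g0, g1, g2, g3, e0, e1, e2, e3]
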